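-- pv_equiv track=rewrite | github.com/Ukasz11233/Algorithms | Algorytmy/Kolokwium_Maj/Zad3.py | DFS
-- ===== SOURCE A (Python) =====
-- def DFS(T, n, m):
--     visited = [[False]*n for _ in range(m)]
--     result = 0
--     array = [0]*n
--
--     def DFS_utility(T, row, column):
--         visited[row][column] = True
--         result = 0
--
--         if column + 1 < n and T[row][column+1] > 0 and visited[row][column+1] == False:
--             result += DFS_utility(T, row, column+1)
--         if column - 1 >= 0 and T[row][column-1] > 0 and visited[row][column-1] == False:
--             result += DFS_utility(T, row, column-1)
--         if row + 1 < n and T[row+1][column] > 0 and visited[row+1][column] == False: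
--             result += DFS_utility(T, row+1, column)
--         if row - 1 >= 0 and T[row-1][column] > 0 and visited[row-1][column] == False:
--             result += DFS_utility(T, row-1 ,column)
--
--         return result + T[row][column]
--
--     for i in range(n):
--         if visited[0][i] == False and T[0][i] > 0:
--             array[i] = DFS_utility(T, 0, i)
--
--     return array
-- ===== SOURCE B (Python) =====
-- def DFS(T, n, m):
--     visited = [[False]*n for _ in range(m)]
--     array = [0]*n
--     for i in range(n):
--         if not visited[0][i] and T[0][i] > 0:
--             visited[0][i] = True
--             stack = [(0, i)]
--             total = 0
--             while stack:
--                 row, col = stack.pop()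
--                 total += T[row][col]
--                 for r2, c2 in ((row, col + 1), (row, col - 1), (row + 1, col), (row - 1, col)):
--                     if 0 <= r2 < n and 0 <= c2 < n and T[r2][c2] > 0 and not visited[r2][c2]:
--                         visited[r2][c2] = True
--                         stack.append((r2, c2))
--             array[i] = total
--     return array
-- ===== Notes on version B (the rewrite author's own statement) =====
-- stated objective: idiomatic
-- what changed: The per-start flood fill is rewritten as an iterative explicit-stack worklist that marks cells when pushed and sums them when popped, replacing A's nested recursive DFS_utility that marks cells on call entry and sums on return.
-- outside the precondition, e.g. on DFS([[0, 0], [0, 0]], 2, 1): A returns [0, 0], B returns [0, 0]; on DFS([[0, 0], [1]], 2, 2): A returns [0, 0], B returns [0, 0]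
import Mathlib
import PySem

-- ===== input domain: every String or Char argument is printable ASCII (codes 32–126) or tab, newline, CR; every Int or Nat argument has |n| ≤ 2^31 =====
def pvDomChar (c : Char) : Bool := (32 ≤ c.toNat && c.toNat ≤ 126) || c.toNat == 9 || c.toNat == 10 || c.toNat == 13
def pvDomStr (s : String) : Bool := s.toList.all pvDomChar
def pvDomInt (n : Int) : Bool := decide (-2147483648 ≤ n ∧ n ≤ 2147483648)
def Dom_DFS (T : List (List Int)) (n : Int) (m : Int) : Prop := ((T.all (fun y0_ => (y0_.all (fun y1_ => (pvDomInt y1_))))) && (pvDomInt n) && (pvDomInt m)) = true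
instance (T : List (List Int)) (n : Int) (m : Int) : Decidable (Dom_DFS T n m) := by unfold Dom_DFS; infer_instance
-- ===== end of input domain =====

-- B re-implements each per-start flood fill with an explicit stack (mark on push, sum on pop)
-- instead of A's recursive DFS_utility (mark on call entry, sum on return).

-- ===== PORT A =====
-- shared grid accessors (total forms of T[r][c], visited[r][c], visited[r][c] = True;
-- inside Pre_ every access the Python performs is in range, so the defaults never matter)
def tval (T : List (List Int)) (x : ℕ × ℕ) : Int := (T.getD x.1 []).getD x.2 0
def vget (v : List (List Bool)) (x : ℕ × ℕ) : Bool := (v.getD x.1 []).getD x.2 false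
def vset (v : List (List Bool)) (x : ℕ × ℕ) : List (List Bool) := v.set x.1 ((v.getD x.1 []).set x.2 true)

-- one guarded `if …: result += DFS_utility(…)` step of A, with the recursive call passed as `f`
def dtry (T : List (List Int)) (n : ℕ) (f : List (List Bool) → ℕ → ℕ → Int × List (List Bool))
    (bnd : Prop) [Decidable bnd] (p : Int × List (List Bool)) (y : ℕ × ℕ) :
    Int × List (List Bool) :=
  if bnd ∧ 0 < tval T y ∧ vget p.2 y = false then
    (p.1 + (f p.2 y.1 y.2).1, (f p.2 y.1 y.2).2)
  else p

-- A's DFS_utility: mark (r,c), then the four guarded recursive calls in A's order, threading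
-- `visited`; the fuel argument only makes the recursion structural (never exhausted inside Pre_).
def dfsUtil (T : List (List Int)) (n : ℕ) : ℕ → List (List Bool) → ℕ → ℕ → Int × List (List Bool)
  | 0, v, _, _ => (0, v)
  | fuel + 1, v, r, c =>
    let v0 := vset v (r, c)
    let p1 := dtry T n (dfsUtil T n fuel) (c + 1 < n) (0, v0) (r, c + 1)
    let p2 := dtry T n (dfsUtil T n fuel) (1 ≤ c) p1 (r, c - 1)
    let p3 := dtry T n (dfsUtil T n fuel) (r + 1 < n) p2 (r + 1, c)
    let p4 := dtry T n (dfsUtil T n fuel) (1 ≤ r) p3 (r - 1, c)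
    (p4.1 + tval T (r, c), p4.2)

def DFS (T : List (List Int)) (n : Int) (m : Int) : List Int :=
  ((List.range n.toNat).foldl (fun (st : List (List Bool) × List Int) i =>
      if vget st.1 (0, i) = false ∧ 0 < tval T (0, i) then
        ((dfsUtil T n.toNat (m.toNat * n.toNat + 1) st.1 0 i).2,
          st.2.set i (dfsUtil T n.toNat (m.toNat * n.toNat + 1) st.1 0 i).1)
      else st)
    (List.replicate m.toNat (List.replicate n.toNat false), List.replicate n.toNat 0)).2

-- ===== PORT B =====
-- the neighbour tuple Source B iterates over, as Python ints (col-1 / row-1 may be negative)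
def nbrs (x : ℕ × ℕ) : List (Int × Int) :=
  [((x.1 : Int), (x.2 : Int) + 1), ((x.1 : Int), (x.2 : Int) - 1),
   ((x.1 : Int) + 1, (x.2 : Int)), ((x.1 : Int) - 1, (x.2 : Int))]

-- Source B's `if 0 <= r2 < n and 0 <= c2 < n and T[r2][c2] > 0 and not visited[r2][c2]: mark; push`
def tryPush (T : List (List Int)) (n : ℕ) (acc : List (ℕ × ℕ) × List (List Bool))
    (y : Int × Int) : List (ℕ × ℕ) × List (List Bool) :=
  if 0 ≤ y.1 ∧ y.1 < (n : Int) ∧ 0 ≤ y.2 ∧ y.2 < (n : Int) ∧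
      0 < tval T (y.1.toNat, y.2.toNat) ∧ vget acc.2 (y.1.toNat, y.2.toNat) = false then
    ((y.1.toNat, y.2.toNat) :: acc.1, vset acc.2 (y.1.toNat, y.2.toNat))
  else acc

-- Source B's `while stack:` loop; the list head is the stack top (last appended, popped first);
-- the fuel argument only makes the loop structural (never exhausted inside Pre_).
def stackLoop (T : List (List Int)) (n : ℕ) : ℕ → List (ℕ × ℕ) → List (List Bool) → Int →
    Int × List (List Bool)
  | _, [], v, tot => (tot, v)
  | 0, _ :: _, v, tot => (tot, v)
  | fuel + 1, x :: rest, v, tot =>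
    stackLoop T n fuel ((nbrs x).foldl (tryPush T n) (rest, v)).1
      ((nbrs x).foldl (tryPush T n) (rest, v)).2 (tot + tval T x)

def DFS_alt (T : List (List Int)) (n : Int) (m : Int) : List Int :=
  ((List.range n.toNat).foldl (fun (st : List (List Bool) × List Int) i =>
      if vget st.1 (0, i) = false ∧ 0 < tval T (0, i) then
        ((stackLoop T n.toNat (m.toNat * n.toNat + 1) [(0, i)] (vset st.1 (0, i)) 0).2,
          st.2.set i (stackLoop T n.toNat (m.toNat * n.toNat + 1) [(0, i)] (vset st.1 (0, i)) 0).1)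
      else st)
    (List.replicate m.toNat (List.replicate n.toNat false), List.replicate n.toNat 0)).2

-- ===== PRECONDITION & SPEC =====
-- Pre_ excludes the inputs where Python A raises IndexError: when n > 0 it needs m ≥ n rows of
-- `visited` and an (at least) n×n top-left prefix of T.  This is slightly narrower than A's exact
-- domain: on grids whose out-of-range cells are never reached by the flood fill (e.g. a short row
-- below an all-nonpositive top row) A still returns, and B returns the same value there.
def Pre_DFS (T : List (List Int)) (n : Int) (m : Int) : Prop :=
  0 < n → (n ≤ m ∧ n.toNat ≤ T.length ∧ ∀ row ∈ T.take n.toNat, n.toNat ≤ row.length)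
instance (T : List (List Int)) (n : Int) (m : Int) : Decidable (Pre_DFS T n m) := by
  unfold Pre_DFS; infer_instance

def pvWitness_DFS : List (List Int) × Int × Int := ([[1, 2], [0, 3]], 2, 2)

def Spec_DFS (T : List (List Int)) (n : Int) (m : Int) (out : List Int) : Prop := out = DFS_alt T n m
instance (T : List (List Int)) (n : Int) (m : Int) (out : List Int) : Decidable (Spec_DFS T n m out) := by unfold Spec_DFS; infer_instance

-- ===== CLAIM (what is proved, stated in full; the proofs are below) =====
def Claim_equal_DFS : Prop := ∀ (T : List (List Int)) (n : Int) (m : Int), Dom_DFS T n m → Pre_DFS T n m → Spec_DFS T n m (DFS T n m)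

-- ===== LEMMAS AND PROOFS =====

-- ---- abstractions used only by the proofs ----

def Vshape (M n : ℕ) (v : List (List Bool)) : Prop := v.length = M ∧ ∀ r ∈ v, r.length = n

def Vle (v w : List (List Bool)) : Prop := ∀ x, vget v x = true → vget w x = true

def cellOK (T : List (List Int)) (n : ℕ) (x : ℕ × ℕ) : Prop :=
  x.1 < n ∧ x.2 < n ∧ 0 < tval T x

def adjc (x y : ℕ × ℕ) : Prop :=
  (x.1 = y.1 ∧ (x.2 + 1 = y.2 ∨ y.2 + 1 = x.2)) ∨ (x.2 = y.2 ∧ (x.1 + 1 = y.1 ∨ y.1 + 1 = x.1))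

inductive Reach (T : List (List Int)) (n : ℕ) (v : List (List Bool)) (s : ℕ × ℕ) : (ℕ × ℕ) → Prop
  | refl : Reach T n v s s
  | step {x y : ℕ × ℕ} : Reach T n v s x → adjc x y → cellOK T n y → vget v y = false →
      Reach T n v s y

def gsum (T : List (List Int)) (M n : ℕ) (v : List (List Bool)) : Int :=
  ∑ x ∈ Finset.range M ×ˢ Finset.range n, (if vget v x = true then tval T x else 0)

def fcnt (M n : ℕ) (v : List (List Bool)) : ℕ :=
  ∑ x ∈ Finset.range M ×ˢ Finset.range n, (if vget v x = true then 0 else 1)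

def stSum (T : List (List Int)) (st : List (ℕ × ℕ)) : Int := (st.map (tval T)).sum

-- ---- getD / set basics ----

lemma getD_set_ne {α : Type} {l : List α} {i j : ℕ} (h : i ≠ j) (a d : α) :
    (l.set i a).getD j d = l.getD j d := by
  simp [List.getD_eq_getElem?_getD, List.getElem?_set_ne h]

lemma getD_set_self {α : Type} {l : List α} {i : ℕ} (h : i < l.length) (a d : α) :
    (l.set i a).getD i d = a := by
  simp [List.getD_eq_getElem?_getD, List.getElem?_set_self h]

lemma getD_lt {α : Type} {l : List α} {i : ℕ} (h : i < l.length) (d : α) :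
    l.getD i d = l[i] := by
  simp [List.getD_eq_getElem?_getD, List.getElem?_eq_getElem h]

lemma vget_vset_ne {v : List (List Bool)} {x y : ℕ × ℕ} (h : y ≠ x) :
    vget (vset v x) y = vget v y := by
  rcases x with ⟨a, b⟩; rcases y with ⟨c, d⟩
  unfold vget vset
  by_cases hac : c = a
  · subst hac
    have hbd : b ≠ d := by
      intro hb; exact h (by simp [hb])
    by_cases hl : c < v.length
    · rw [getD_set_self hl]
      exact getD_set_ne hbd _ _
    · rw [List.set_eq_of_length_le (by omega)]
  · rw [getD_set_ne (fun hh => hac hh.symm) _ _]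

lemma vget_vset_self {v : List (List Bool)} {x : ℕ × ℕ}
    (h1 : x.1 < v.length) (h2 : x.2 < (v.getD x.1 []).length) :
    vget (vset v x) x = true := by
  unfold vget vset
  rw [getD_set_self h1, getD_set_self h2]

lemma vget_true_lt {v : List (List Bool)} {x : ℕ × ℕ} (h : vget v x = true) :
    x.1 < v.length ∧ x.2 < (v.getD x.1 []).length := by
  unfold vget at h
  by_cases h1 : x.1 < v.length
  · refine ⟨h1, ?_⟩
    by_cases h2 : x.2 < (v.getD x.1 []).length
    · exact h2
    · exfalso
      rw [List.getD_eq_getElem?_getD (l := v.getD x.1 []), List.getElem?_eq_none (by omega)] at h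
      simp at h
  · exfalso
    have hrow : v.getD x.1 [] = [] := by
      rw [List.getD_eq_getElem?_getD, List.getElem?_eq_none (by omega)]
      rfl
    rw [hrow] at h
    simp at h

lemma vget_vset_le {v : List (List Bool)} {x y : ℕ × ℕ} (h : vget v y = true) :
    vget (vset v x) y = true := by
  by_cases hxy : y = x
  · subst hxy
    obtain ⟨h1, h2⟩ := vget_true_lt h
    exact vget_vset_self h1 h2
  · rw [vget_vset_ne hxy]; exact h

lemma vget_vset_inv {v : List (List Bool)} {x y : ℕ × ℕ} (h : vget (vset v x) y = true) :
    vget v y = true ∨ y = x := by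
  by_cases hxy : y = x
  · right; exact hxy
  · left; rwa [vget_vset_ne hxy] at h

lemma Vshape_vset {M n : ℕ} {v : List (List Bool)} (hv : Vshape M n v) (x : ℕ × ℕ) :
    Vshape M n (vset v x) := by
  obtain ⟨hlen, hrow⟩ := hv
  by_cases hl : x.1 < v.length
  · refine ⟨by simp [vset, hlen], ?_⟩
    intro r hr
    rcases List.mem_or_eq_of_mem_set hr with h | h
    · exact hrow r h
    · subst h
      rw [List.length_set, getD_lt hl]
      exact hrow _ (List.getElem_mem hl)
  · unfold vset
    rw [List.set_eq_of_length_le (by omega)]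
    exact ⟨hlen, hrow⟩

lemma shape_bounds {M n : ℕ} {v : List (List Bool)} (hv : Vshape M n v) {x : ℕ × ℕ}
    (h1 : x.1 < M) (h2 : x.2 < n) : x.1 < v.length ∧ x.2 < (v.getD x.1 []).length := by
  obtain ⟨hlen, hrow⟩ := hv
  have hx1 : x.1 < v.length := by omega
  refine ⟨hx1, ?_⟩
  rw [getD_lt hx1, hrow _ (List.getElem_mem hx1)]
  exact h2

lemma vset_mark {M n : ℕ} {v : List (List Bool)} (hv : Vshape M n v) {x : ℕ × ℕ}
    (h1 : x.1 < M) (h2 : x.2 < n) : vget (vset v x) x = true := by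
  obtain ⟨g1, g2⟩ := shape_bounds hv h1 h2
  exact vget_vset_self g1 g2

lemma list_ext_getD {l l' : List Bool} (hlen : l.length = l'.length)
    (h : ∀ j, l.getD j false = l'.getD j false) : l = l' := by
  apply List.ext_getElem?
  intro j
  by_cases hj : j < l.length
  · rw [List.getElem?_eq_getElem hj, List.getElem?_eq_getElem (by omega)]
    have := h j
    rw [getD_lt hj, getD_lt (by omega)] at this
    simpa using this
  · rw [List.getElem?_eq_none (by omega), List.getElem?_eq_none (by omega)]

lemma vext {M n : ℕ} {v w : List (List Bool)} (hv : Vshape M n v) (hw : Vshape M n w)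
    (h : ∀ x, vget v x = vget w x) : v = w := by
  have hv1 : v.length = M := hv.1
  have hw1 : w.length = M := hw.1
  apply List.ext_getElem?
  intro i
  by_cases hi : i < v.length
  · have hiw : i < w.length := by omega
    rw [List.getElem?_eq_getElem hi, List.getElem?_eq_getElem hiw]
    have hrow : v[i] = w[i] := by
      apply list_ext_getD
      · rw [hv.2 _ (List.getElem_mem hi), hw.2 _ (List.getElem_mem hiw)]
      · intro j
        have := h (i, j)
        unfold vget at this
        rwa [getD_lt (l := v) hi, getD_lt (l := w) hiw] at this
    rw [hrow]
  · rw [List.getElem?_eq_none (by omega), List.getElem?_eq_none (by omega)]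

-- ---- gsum / fcnt ----

lemma gsum_vset {T : List (List Int)} {M n : ℕ} {v : List (List Bool)} (hv : Vshape M n v)
    {x : ℕ × ℕ} (h1 : x.1 < M) (h2 : x.2 < n) (hf : vget v x = false) :
    gsum T M n (vset v x) = gsum T M n v + tval T x := by
  have hx : x ∈ Finset.range M ×ˢ Finset.range n := by
    simp [Finset.mem_product, h1, h2]
  unfold gsum
  rw [Finset.sum_eq_sum_diff_singleton_add hx, Finset.sum_eq_sum_diff_singleton_add hx
    (fun y => if vget v y = true then tval T y else 0)]
  have hdiff : ∀ y ∈ (Finset.range M ×ˢ Finset.range n) \ {x},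
      (if vget (vset v x) y = true then tval T y else 0)
        = (if vget v y = true then tval T y else 0) := by
    intro y hy
    have hyx : y ≠ x := by
      simp [Finset.mem_sdiff] at hy
      exact hy.2
    rw [vget_vset_ne hyx]
  rw [Finset.sum_congr rfl hdiff, vset_mark hv h1 h2, hf]
  simp

lemma fcnt_vset {M n : ℕ} {v : List (List Bool)} (hv : Vshape M n v)
    {x : ℕ × ℕ} (h1 : x.1 < M) (h2 : x.2 < n) (hf : vget v x = false) :
    fcnt M n (vset v x) + 1 = fcnt M n v := by
  have hx : x ∈ Finset.range M ×ˢ Finset.range n := by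
    simp [Finset.mem_product, h1, h2]
  unfold fcnt
  rw [Finset.sum_eq_sum_diff_singleton_add hx, Finset.sum_eq_sum_diff_singleton_add hx
    (fun y => if vget v y = true then 0 else 1)]
  have hdiff : ∀ y ∈ (Finset.range M ×ˢ Finset.range n) \ {x},
      (if vget (vset v x) y = true then (0 : ℕ) else 1)
        = (if vget v y = true then 0 else 1) := by
    intro y hy
    have hyx : y ≠ x := by
      simp [Finset.mem_sdiff] at hy
      exact hy.2
    rw [vget_vset_ne hyx]
  rw [Finset.sum_congr rfl hdiff, vset_mark hv h1 h2, hf]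
  simp

lemma fcnt_le (M n : ℕ) (v : List (List Bool)) : fcnt M n v ≤ M * n := by
  unfold fcnt
  calc ∑ x ∈ Finset.range M ×ˢ Finset.range n, (if vget v x = true then 0 else 1)
      ≤ ∑ _x ∈ Finset.range M ×ˢ Finset.range n, 1 :=
        Finset.sum_le_sum (fun i _ => by split <;> omega)
    _ = M * n := by simp [Finset.card_product]

lemma fcnt_anti {M n : ℕ} {v w : List (List Bool)} (h : Vle v w) :
    fcnt M n w ≤ fcnt M n v := by
  unfold fcnt
  refine Finset.sum_le_sum (fun x _ => ?_)
  dsimp only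
  cases hvx : vget v x
  · cases hwx : vget w x <;> simp [hwx]
  · simp [h x hvx]

-- ---- Reach ----

lemma Reach_trans {T : List (List Int)} {n : ℕ} {v : List (List Bool)} {a b c : ℕ × ℕ}
    (h1 : Reach T n v a b) (h2 : Reach T n v b c) : Reach T n v a c := by
  induction h2 with
  | refl => exact h1
  | step hr hadj hok hun ih => exact Reach.step ih hadj hok hun

lemma Reach_anti {T : List (List Int)} {n : ℕ} {v w : List (List Bool)} {s z : ℕ × ℕ}
    (hle : Vle v w) (h : Reach T n w s z) : Reach T n v s z := by
  induction h with
  | refl => exact Reach.refl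
  | @step x y hr hadj hok hun ih =>
    refine Reach.step ih hadj hok ?_
    cases hy : vget v y
    · rfl
    · exact absurd (hle _ hy) (by simp [hun])

lemma Reach_head {T : List (List Int)} {n : ℕ} {v : List (List Bool)} {s z : ℕ × ℕ}
    (h : Reach T n v s z) : z = s ∨ vget v z = false := by
  cases h with
  | refl => left; rfl
  | step _ _ _ hun => right; exact hun

lemma reach_subset {T : List (List Int)} {n : ℕ} {v : List (List Bool)} {s : ℕ × ℕ}
    {W : ℕ × ℕ → Prop} (hs : W s)
    (hcl : ∀ x, (x = s ∨ (W x ∧ vget v x = false)) → ∀ y, adjc x y → cellOK T n y → W y) :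
    ∀ z, Reach T n v s z → W z := by
  intro z h
  induction h with
  | refl => exact hs
  | @step x y hr hadj hok hun ih =>
    refine hcl x ?_ y hadj hok
    rcases Reach_head hr with h1 | h1
    · left; exact h1
    · right; exact ⟨ih, h1⟩

-- ---- tryPush / its fold (B's neighbour scan) ----

lemma tp_Vle (T : List (List Int)) (n : ℕ) (acc : List (ℕ × ℕ) × List (List Bool))
    (y : Int × Int) : Vle acc.2 (tryPush T n acc y).2 := by
  unfold tryPush
  split_ifs with h
  · exact fun z hz => vget_vset_le hz
  · exact fun z hz => hz

lemma tp_shape {M n : ℕ} {T : List (List Int)} {acc : List (ℕ × ℕ) × List (List Bool)}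
    (hv : Vshape M n acc.2) (y : Int × Int) : Vshape M n (tryPush T n acc y).2 := by
  unfold tryPush
  split_ifs with h
  · exact Vshape_vset hv _
  · exact hv

lemma tp_stack_mono (T : List (List Int)) (n : ℕ) (acc : List (ℕ × ℕ) × List (List Bool))
    (y : Int × Int) : ∀ z ∈ acc.1, z ∈ (tryPush T n acc y).1 := by
  unfold tryPush
  split_ifs with h
  · exact fun z hz => List.mem_cons_of_mem _ hz
  · exact fun z hz => hz

lemma tp_stack_sound (T : List (List Int)) (n : ℕ) (acc : List (ℕ × ℕ) × List (List Bool))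
    (y : Int × Int) : ∀ z ∈ (tryPush T n acc y).1,
      z ∈ acc.1 ∨ (vget acc.2 z = false ∧ z.1 < n ∧ z.2 < n ∧ 0 < tval T z ∧
        z = (y.1.toNat, y.2.toNat) ∧ 0 ≤ y.1 ∧ 0 ≤ y.2) := by
  unfold tryPush
  split_ifs with h
  · intro z hz
    rcases List.mem_cons.mp hz with hz | hz
    · obtain ⟨h1, h2, h3, h4, h5, h6⟩ := h
      subst hz
      right
      exact ⟨h6, by omega, by omega, h5, rfl, h1, h3⟩
    · left; exact hz
  · intro z hz; left; exact hz

lemma tp_marked (T : List (List Int)) (n : ℕ) (acc : List (ℕ × ℕ) × List (List Bool))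
    (y : Int × Int) : ∀ z, vget (tryPush T n acc y).2 z = true →
      vget acc.2 z = true ∨ z ∈ (tryPush T n acc y).1 := by
  unfold tryPush
  split_ifs with h
  · intro z hz
    rcases vget_vset_inv hz with h1 | h1
    · left; exact h1
    · right; subst h1; exact List.mem_cons_self
  · intro z hz; left; exact hz

lemma tp_gsum {M n : ℕ} {T : List (List Int)} (hM : n ≤ M)
    {acc : List (ℕ × ℕ) × List (List Bool)} (hv : Vshape M n acc.2) (y : Int × Int) :
    gsum T M n (tryPush T n acc y).2 + stSum T acc.1
      = gsum T M n acc.2 + stSum T (tryPush T n acc y).1 := by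
  unfold tryPush
  split_ifs with h
  · obtain ⟨h1, h2, h3, h4, h5, h6⟩ := h
    rw [gsum_vset hv (by omega) (by omega) h6]
    simp [stSum]
    ring
  · rfl

lemma tp_fcnt {M n : ℕ} {T : List (List Int)} (hM : n ≤ M)
    {acc : List (ℕ × ℕ) × List (List Bool)} (hv : Vshape M n acc.2) (y : Int × Int) :
    fcnt M n (tryPush T n acc y).2 + (tryPush T n acc y).1.length
      = fcnt M n acc.2 + acc.1.length := by
  unfold tryPush
  split_ifs with h
  · obtain ⟨h1, h2, h3, h4, h5, h6⟩ := h
    have := fcnt_vset hv (x := (y.1.toNat, y.2.toNat)) (by omega) (by omega) h6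
    simp [List.length_cons]
    omega
  · rfl

lemma tp_covers {M n : ℕ} {T : List (List Int)} (hM : n ≤ M)
    {acc : List (ℕ × ℕ) × List (List Bool)} (hv : Vshape M n acc.2) {y : Int × Int} {z : ℕ × ℕ}
    (hz : z = (y.1.toNat, y.2.toNat)) (h1 : 0 ≤ y.1) (h2 : y.1 < (n : Int)) (h3 : 0 ≤ y.2)
    (h4 : y.2 < (n : Int)) (h5 : 0 < tval T z) :
    vget (tryPush T n acc y).2 z = true := by
  subst hz
  unfold tryPush
  split_ifs with h
  · have hb1 : y.1.toNat < M := by omega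
    have hb2 : y.2.toNat < n := by omega
    exact vset_mark hv (x := (y.1.toNat, y.2.toNat)) hb1 hb2
  · cases hg : vget acc.2 (y.1.toNat, y.2.toNat)
    · exact absurd ⟨h1, h2, h3, h4, h5, hg⟩ h
    · rfl

lemma fold_shape {M n : ℕ} {T : List (List Int)} (ys : List (Int × Int)) :
    ∀ acc : List (ℕ × ℕ) × List (List Bool), Vshape M n acc.2 →
      Vshape M n (List.foldl (tryPush T n) acc ys).2 := by
  induction ys with
  | nil => exact fun acc h => h
  | cons y ys ih => exact fun acc h => ih _ (tp_shape h y)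

lemma fold_Vle {n : ℕ} {T : List (List Int)} (ys : List (Int × Int)) :
    ∀ acc : List (ℕ × ℕ) × List (List Bool), Vle acc.2 (List.foldl (tryPush T n) acc ys).2 := by
  induction ys with
  | nil => exact fun acc z hz => hz
  | cons y ys ih => exact fun acc z hz => ih _ z (tp_Vle T n acc y z hz)

lemma fold_stack_mono {n : ℕ} {T : List (List Int)} (ys : List (Int × Int)) :
    ∀ acc : List (ℕ × ℕ) × List (List Bool), ∀ z ∈ acc.1,
      z ∈ (List.foldl (tryPush T n) acc ys).1 := by
  induction ys with
  | nil => exact fun acc z hz => hz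
  | cons y ys ih => exact fun acc z hz => ih _ z (tp_stack_mono T n acc y z hz)

lemma fold_stack_sound {n : ℕ} {T : List (List Int)} (ys : List (Int × Int)) :
    ∀ acc : List (ℕ × ℕ) × List (List Bool), ∀ z ∈ (List.foldl (tryPush T n) acc ys).1,
      z ∈ acc.1 ∨ (vget acc.2 z = false ∧ z.1 < n ∧ z.2 < n ∧ 0 < tval T z ∧
        ∃ y ∈ ys, z = (y.1.toNat, y.2.toNat) ∧ 0 ≤ y.1 ∧ 0 ≤ y.2) := by
  induction ys with
  | nil => exact fun acc z hz => Or.inl hz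
  | cons y ys ih =>
    intro acc z hz
    rcases ih _ z hz with h | h
    · rcases tp_stack_sound T n acc y z h with h1 | h1
      · left; exact h1
      · right
        exact ⟨h1.1, h1.2.1, h1.2.2.1, h1.2.2.2.1,
          y, List.mem_cons_self, h1.2.2.2.2.1, h1.2.2.2.2.2.1, h1.2.2.2.2.2.2⟩
    · right
      obtain ⟨hzf, hb1, hb2, hp, y', hy', hrest⟩ := h
      refine ⟨?_, hb1, hb2, hp, y', List.mem_cons_of_mem _ hy', hrest⟩
      cases hg : vget acc.2 z
      · rfl
      · exact absurd (tp_Vle T n acc y z hg) (by simp [hzf])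

lemma fold_marked {n : ℕ} {T : List (List Int)} (ys : List (Int × Int)) :
    ∀ acc : List (ℕ × ℕ) × List (List Bool), ∀ z,
      vget (List.foldl (tryPush T n) acc ys).2 z = true →
      vget acc.2 z = true ∨ z ∈ (List.foldl (tryPush T n) acc ys).1 := by
  induction ys with
  | nil => exact fun acc z hz => Or.inl hz
  | cons y ys ih =>
    intro acc z hz
    rcases ih _ z hz with h | h
    · rcases tp_marked T n acc y z h with h1 | h1
      · left; exact h1
      · right; exact fold_stack_mono ys _ z h1
    · right; exact h

lemma fold_gsum {M n : ℕ} {T : List (List Int)} (hM : n ≤ M) (ys : List (Int × Int)) :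
    ∀ acc : List (ℕ × ℕ) × List (List Bool), Vshape M n acc.2 →
      gsum T M n (List.foldl (tryPush T n) acc ys).2 + stSum T acc.1
        = gsum T M n acc.2 + stSum T (List.foldl (tryPush T n) acc ys).1 := by
  induction ys with
  | nil => exact fun acc _ => rfl
  | cons y ys ih =>
    intro acc hv
    have h1 := tp_gsum (T := T) hM hv y
    have h2 := ih (tryPush T n acc y) (tp_shape hv y)
    simp only [List.foldl_cons]
    omega

lemma fold_fcnt {M n : ℕ} {T : List (List Int)} (hM : n ≤ M) (ys : List (Int × Int)) :
    ∀ acc : List (ℕ × ℕ) × List (List Bool), Vshape M n acc.2 →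
      fcnt M n (List.foldl (tryPush T n) acc ys).2 + (List.foldl (tryPush T n) acc ys).1.length
        = fcnt M n acc.2 + acc.1.length := by
  induction ys with
  | nil => exact fun acc _ => rfl
  | cons y ys ih =>
    intro acc hv
    have h1 := tp_fcnt (T := T) hM hv y
    have h2 := ih (tryPush T n acc y) (tp_shape hv y)
    simp only [List.foldl_cons]
    omega

lemma nbrs_adj {x : ℕ × ℕ} : ∀ y ∈ nbrs x, 0 ≤ y.1 → 0 ≤ y.2 →
    adjc x (y.1.toNat, y.2.toNat) := by
  rcases x with ⟨r, c⟩
  intro y hy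
  simp only [nbrs, List.mem_cons, List.mem_singleton, List.not_mem_nil, or_false] at hy
  rcases hy with rfl | rfl | rfl | rfl <;>
    · intro h1 h2
      simp only [adjc]
      omega

lemma nbrs_covers {M n : ℕ} {T : List (List Int)} (hM : n ≤ M) {v : List (List Bool)}
    (hv : Vshape M n v) {x : ℕ × ℕ} (hx1 : x.1 < n) (hx2 : x.2 < n)
    (rest : List (ℕ × ℕ)) :
    ∀ z, adjc x z → cellOK T n z →
      vget (List.foldl (tryPush T n) (rest, v) (nbrs x)).2 z = true := by
  rcases x with ⟨r, c⟩
  intro z hadj hok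
  rcases z with ⟨z1, z2⟩
  have hz1 : z1 < n := hok.1
  have hz2 : z2 < n := hok.2.1
  have hzp : 0 < tval T (z1, z2) := hok.2.2
  have hcase : (z1 = r ∧ z2 = c + 1) ∨ (z1 = r ∧ z2 + 1 = c) ∨ (z2 = c ∧ z1 = r + 1) ∨
      (z2 = c ∧ z1 + 1 = r) := by
    simp only [adjc] at hadj
    omega
  simp only [nbrs, List.foldl_cons, List.foldl_nil]
  have hs0 : Vshape M n (rest, v).2 := hv
  have hs1 := tp_shape (T := T) hs0 ((r : Int), (c : Int) + 1)
  have hs2 := tp_shape (T := T) hs1 ((r : Int), (c : Int) - 1)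
  have hs3 := tp_shape (T := T) hs2 ((r : Int) + 1, (c : Int))
  rcases hcase with ⟨e1, e2⟩ | ⟨e1, e2⟩ | ⟨e1, e2⟩ | ⟨e1, e2⟩
  · have hm := tp_covers hM hs0 (y := ((r : Int), (c : Int) + 1)) (z := (z1, z2))
      (by simp; omega) (by omega) (by omega) (by omega) (by omega) hzp
    exact tp_Vle T n _ _ _ (tp_Vle T n _ _ _ (tp_Vle T n _ _ _ hm))
  · have hm := tp_covers hM hs1 (y := ((r : Int), (c : Int) - 1)) (z := (z1, z2))
      (by simp; omega) (by omega) (by omega) (by omega) (by omega) hzp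
    exact tp_Vle T n _ _ _ (tp_Vle T n _ _ _ hm)
  · have hm := tp_covers hM hs2 (y := ((r : Int) + 1, (c : Int))) (z := (z1, z2))
      (by simp; omega) (by omega) (by omega) (by omega) (by omega) hzp
    exact tp_Vle T n _ _ _ hm
  · exact tp_covers hM hs3 (y := ((r : Int) - 1, (c : Int))) (z := (z1, z2))
      (by simp; omega) (by omega) (by omega) (by omega) (by omega) hzp

-- ---- stackLoop (B's while loop) ----

lemma SL_shape {M : ℕ} (T : List (List Int)) (n : ℕ) :
    ∀ (fuel : ℕ) (st : List (ℕ × ℕ)) (v : List (List Bool)) (tot : Int),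
      Vshape M n v → Vshape M n (stackLoop T n fuel st v tot).2 := by
  intro fuel
  induction fuel with
  | zero =>
    intro st v tot hv
    cases st <;> simpa [stackLoop] using hv
  | succ fuel ih =>
    intro st v tot hv
    cases st with
    | nil => simpa [stackLoop] using hv
    | cons x rest =>
      simp only [stackLoop]
      exact ih _ _ _ (fold_shape (nbrs x) (rest, v) hv)

lemma SL_Vle (T : List (List Int)) (n : ℕ) :
    ∀ (fuel : ℕ) (st : List (ℕ × ℕ)) (v : List (List Bool)) (tot : Int),
      Vle v (stackLoop T n fuel st v tot).2 := by
  intro fuel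
  induction fuel with
  | zero =>
    intro st v tot
    cases st <;> exact fun z hz => by simpa [stackLoop] using hz
  | succ fuel ih =>
    intro st v tot
    cases st with
    | nil => exact fun z hz => by simpa [stackLoop] using hz
    | cons x rest =>
      intro z hz
      simp only [stackLoop]
      exact ih _ _ _ z (fold_Vle (nbrs x) (rest, v) z hz)

lemma SL_sum {M : ℕ} (T : List (List Int)) (n : ℕ) (hM : n ≤ M) :
    ∀ (fuel : ℕ) (st : List (ℕ × ℕ)) (v : List (List Bool)) (tot : Int),
      Vshape M n v → st.length + fcnt M n v ≤ fuel →
      (stackLoop T n fuel st v tot).1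
        = tot + stSum T st + (gsum T M n (stackLoop T n fuel st v tot).2 - gsum T M n v) := by
  intro fuel
  induction fuel with
  | zero =>
    intro st v tot hv hf
    cases st with
    | nil => simp [stackLoop, stSum]
    | cons x rest => simp at hf
  | succ fuel ih =>
    intro st v tot hv hf
    cases st with
    | nil => simp [stackLoop, stSum]
    | cons x rest =>
      simp only [stackLoop]
      have hsh := fold_shape (T := T) (nbrs x) (rest, v) hv
      have hg := fold_gsum (T := T) hM (nbrs x) (rest, v) hv
      have hc := fold_fcnt (T := T) hM (nbrs x) (rest, v) hv
      dsimp only at hg hc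
      simp only [List.length_cons] at hf
      have hf' : (List.foldl (tryPush T n) (rest, v) (nbrs x)).1.length
          + fcnt M n (List.foldl (tryPush T n) (rest, v) (nbrs x)).2 ≤ fuel := by omega
      have hih := ih (List.foldl (tryPush T n) (rest, v) (nbrs x)).1
        (List.foldl (tryPush T n) (rest, v) (nbrs x)).2 (tot + tval T x) hsh hf'
      rw [hih]
      simp only [stSum, List.map_cons, List.sum_cons, stSum] at hg ⊢
      omega

lemma SL_sound (T : List (List Int)) (n : ℕ) :
    ∀ (fuel : ℕ) (st : List (ℕ × ℕ)) (v : List (List Bool)) (tot : Int) (z : ℕ × ℕ),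
      vget (stackLoop T n fuel st v tot).2 z = true →
      vget v z = true ∨ ∃ s ∈ st, Reach T n v s z := by
  intro fuel
  induction fuel with
  | zero =>
    intro st v tot z hz
    cases st <;> (left; simpa [stackLoop] using hz)
  | succ fuel ih =>
    intro st v tot z hz
    cases st with
    | nil => left; simpa [stackLoop] using hz
    | cons x rest =>
      simp only [stackLoop] at hz
      rcases ih _ _ _ z hz with h1 | ⟨s, hs, hr⟩
      · rcases fold_marked (nbrs x) (rest, v) z h1 with h2 | h2
        · left; exact h2
        · rcases fold_stack_sound (nbrs x) (rest, v) z h2 with h3 | h3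
          · right; exact ⟨z, List.mem_cons_of_mem _ h3, Reach.refl⟩
          · obtain ⟨hzf, hb1, hb2, hp, y, hy, hzy, hy1, hy2⟩ := h3
            right
            refine ⟨x, List.mem_cons_self, Reach.step Reach.refl ?_ ⟨hb1, hb2, hp⟩ hzf⟩
            rw [hzy]
            exact nbrs_adj y hy hy1 hy2
      · have hrv : Reach T n v s z := Reach_anti (fold_Vle (nbrs x) (rest, v)) hr
        rcases fold_stack_sound (nbrs x) (rest, v) s hs with h3 | h3
        · right; exact ⟨s, List.mem_cons_of_mem _ h3, hrv⟩
        · obtain ⟨hzf, hb1, hb2, hp, y, hy, hzy, hy1, hy2⟩ := h3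
          right
          refine ⟨x, List.mem_cons_self, Reach_trans (Reach.step Reach.refl ?_ ⟨hb1, hb2, hp⟩ hzf) hrv⟩
          rw [hzy]
          exact nbrs_adj y hy hy1 hy2

lemma SL_closed {M : ℕ} (T : List (List Int)) (n : ℕ) (hM : n ≤ M) :
    ∀ (fuel : ℕ) (st : List (ℕ × ℕ)) (v : List (List Bool)) (tot : Int),
      Vshape M n v → (∀ c ∈ st, c.1 < n ∧ c.2 < n) → st.length + fcnt M n v ≤ fuel →
      ∀ z, (z ∈ st ∨ (vget (stackLoop T n fuel st v tot).2 z = true ∧ vget v z = false)) →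
      ∀ w, adjc z w → cellOK T n w → vget (stackLoop T n fuel st v tot).2 w = true := by
  intro fuel
  induction fuel with
  | zero =>
    intro st v tot hv hst hf z hz w hadj hok
    cases st with
    | nil =>
      simp only [stackLoop] at hz
      rcases hz with hz | ⟨h1, h2⟩
      · simp at hz
      · exact absurd h1 (by simp [h2])
    | cons x rest => simp at hf
  | succ fuel ih =>
    intro st v tot hv hst hf z hz w hadj hok
    cases st with
    | nil =>
      simp only [stackLoop] at hz ⊢
      rcases hz with hz | ⟨h1, h2⟩
      · simp at hz
      · exact absurd h1 (by simp [h2])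
    | cons x rest =>
      simp only [stackLoop] at hz ⊢
      have hsh := fold_shape (T := T) (nbrs x) (rest, v) hv
      have hstacc : ∀ c ∈ (List.foldl (tryPush T n) (rest, v) (nbrs x)).1,
          c.1 < n ∧ c.2 < n := by
        intro c hc
        rcases fold_stack_sound (nbrs x) (rest, v) c hc with h | h
        · exact hst c (List.mem_cons_of_mem _ h)
        · exact ⟨h.2.1, h.2.2.1⟩
      have hc := fold_fcnt (T := T) hM (nbrs x) (rest, v) hv
      dsimp only at hc
      simp only [List.length_cons] at hf
      have hf' : (List.foldl (tryPush T n) (rest, v) (nbrs x)).1.length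
          + fcnt M n (List.foldl (tryPush T n) (rest, v) (nbrs x)).2 ≤ fuel := by omega
      have hxb := hst x List.mem_cons_self
      rcases hz with hz | ⟨hz1, hz2⟩
      · rcases List.mem_cons.mp hz with rfl | hz
        · have hcov := nbrs_covers hM hv hxb.1 hxb.2 rest w hadj hok
          exact SL_Vle T n fuel _ _ _ w hcov
        · exact ih _ _ _ hsh hstacc hf' z
            (Or.inl (fold_stack_mono (nbrs x) (rest, v) z hz)) w hadj hok
      · by_cases hz3 : vget (List.foldl (tryPush T n) (rest, v) (nbrs x)).2 z = true
        · rcases fold_marked (nbrs x) (rest, v) z hz3 with h | h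
          · exact absurd h (by simp [hz2])
          · exact ih _ _ _ hsh hstacc hf' z (Or.inl h) w hadj hok
        · exact ih _ _ _ hsh hstacc hf' z
            (Or.inr ⟨hz1, by simpa using hz3⟩) w hadj hok

-- ---- dtry (one guarded recursive call of A) ----

lemma dtry_Vle (T : List (List Int)) (n : ℕ)
    (f : List (List Bool) → ℕ → ℕ → Int × List (List Bool)) (bnd : Prop) [Decidable bnd]
    (p : Int × List (List Bool)) (y : ℕ × ℕ)
    (hf : ∀ v r c, Vle v (f v r c).2) : Vle p.2 (dtry T n f bnd p y).2 := by
  unfold dtry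
  split_ifs with h
  · exact hf p.2 y.1 y.2
  · exact fun z hz => hz

lemma dtry_shape {M : ℕ} {T : List (List Int)} {n : ℕ}
    {f : List (List Bool) → ℕ → ℕ → Int × List (List Bool)} {bnd : Prop} [Decidable bnd]
    {p : Int × List (List Bool)} {y : ℕ × ℕ}
    (hf : ∀ v', Vshape M n v' → Vshape M n (f v' y.1 y.2).2) (hp : Vshape M n p.2) :
    Vshape M n (dtry T n f bnd p y).2 := by
  unfold dtry
  split_ifs with h
  · exact hf _ hp
  · exact hp

lemma dtry_sum {M : ℕ} {T : List (List Int)} {n : ℕ}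
    {f : List (List Bool) → ℕ → ℕ → Int × List (List Bool)} {bnd : Prop} [Decidable bnd]
    {p : Int × List (List Bool)} {y : ℕ × ℕ}
    (hf : bnd → ∀ v', Vshape M n v' → vget v' y = false →
      (f v' y.1 y.2).1 = gsum T M n (f v' y.1 y.2).2 - gsum T M n v')
    (hp : Vshape M n p.2) :
    (dtry T n f bnd p y).1 = p.1 + (gsum T M n (dtry T n f bnd p y).2 - gsum T M n p.2) := by
  unfold dtry
  split_ifs with h
  · have := hf h.1 p.2 hp h.2.2
    simp only []
    omega
  · simp

lemma dtry_sound {T : List (List Int)} {n : ℕ}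
    {f : List (List Bool) → ℕ → ℕ → Int × List (List Bool)} {bnd : Prop} [Decidable bnd]
    {p : Int × List (List Bool)} {y : ℕ × ℕ} {v₁ : List (List Bool)} {root : ℕ × ℕ}
    (hbase : Vle v₁ p.2)
    (hprev : ∀ z, vget p.2 z = true → vget v₁ z = true ∨ Reach T n v₁ root z)
    (hadj : bnd → adjc root y)
    (hyb : bnd → 0 < tval T y → y.1 < n ∧ y.2 < n)
    (hf : bnd → ∀ v' z, vget (f v' y.1 y.2).2 z = true →
      vget (vset v' y) z = true ∨ Reach T n (vset v' y) y z) :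
    ∀ z, vget (dtry T n f bnd p y).2 z = true → vget v₁ z = true ∨ Reach T n v₁ root z := by
  unfold dtry
  split_ifs with h
  · intro z hz
    obtain ⟨hb, hpos, hun⟩ := h
    have hok : cellOK T n y := ⟨(hyb hb hpos).1, (hyb hb hpos).2, hpos⟩
    have hv1y : vget v₁ y = false := by
      cases hv1 : vget v₁ y
      · rfl
      · exact absurd (hbase _ hv1) (by simp [hun])
    have hreachy : Reach T n v₁ root y := Reach.step Reach.refl (hadj hb) hok hv1y
    rcases hf hb p.2 z hz with h1 | h1
    · rcases vget_vset_inv h1 with h2 | h2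
      · exact hprev z h2
      · subst h2; right; exact hreachy
    · right
      have hle : Vle v₁ (vset p.2 y) := fun u hu => vget_vset_le (hbase u hu)
      exact Reach_trans hreachy (Reach_anti hle h1)
  · exact hprev

lemma dtry_marks {M : ℕ} {T : List (List Int)} {n : ℕ}
    {f : List (List Bool) → ℕ → ℕ → Int × List (List Bool)} {bnd : Prop} [Decidable bnd]
    {p : Int × List (List Bool)} {y : ℕ × ℕ}
    (hp : Vshape M n p.2) (hbnd : bnd) (hpos : 0 < tval T y)
    (hf : bnd → ∀ v', Vshape M n v' → vget (f v' y.1 y.2).2 y = true) :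
    vget (dtry T n f bnd p y).2 y = true := by
  unfold dtry
  split_ifs with h
  · exact hf hbnd p.2 hp
  · cases hv : vget p.2 y
    · exact absurd ⟨hbnd, hpos, hv⟩ h
    · rfl

lemma dtry_closed {M : ℕ} {T : List (List Int)} {n : ℕ}
    {f : List (List Bool) → ℕ → ℕ → Int × List (List Bool)} {bnd : Prop} [Decidable bnd]
    {p : Int × List (List Bool)} {y : ℕ × ℕ} {fuel' : ℕ}
    (hfc : bnd → ∀ v', Vshape M n v' → vget v' y = false → fcnt M n v' < fuel' →
      ∀ z, (z = y ∨ (vget (f v' y.1 y.2).2 z = true ∧ vget (vset v' y) z = false)) →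
      ∀ w, adjc z w → cellOK T n w → vget (f v' y.1 y.2).2 w = true)
    (hp : Vshape M n p.2) (hfcnt : fcnt M n p.2 < fuel') :
    ∀ z, vget (dtry T n f bnd p y).2 z = true → vget p.2 z = false →
      ∀ w, adjc z w → cellOK T n w → vget (dtry T n f bnd p y).2 w = true := by
  unfold dtry
  split_ifs with h
  · intro z hz hzf w hadj hok
    refine hfc h.1 p.2 hp h.2.2 hfcnt z ?_ w hadj hok
    by_cases hzy : z = y
    · left; exact hzy
    · right; exact ⟨hz, by rw [vget_vset_ne hzy]; exact hzf⟩
  · intro z hz hzf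
    exact absurd hz (by simp [hzf])

-- ---- dfsUtil (A's recursion) ----

lemma AU_shape {M : ℕ} (T : List (List Int)) (n : ℕ) :
    ∀ (fuel : ℕ) (v : List (List Bool)) (r c : ℕ),
      Vshape M n v → Vshape M n (dfsUtil T n fuel v r c).2 := by
  intro fuel
  induction fuel with
  | zero => intro v r c hv; simpa [dfsUtil] using hv
  | succ fuel ih =>
    intro v r c hv
    simp only [dfsUtil]
    exact dtry_shape (fun v' hv' => ih v' _ _ hv')
      (dtry_shape (fun v' hv' => ih v' _ _ hv')
        (dtry_shape (fun v' hv' => ih v' _ _ hv')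
          (dtry_shape (fun v' hv' => ih v' _ _ hv') (Vshape_vset hv _))))

lemma AU_Vle (T : List (List Int)) (n : ℕ) :
    ∀ (fuel : ℕ) (v : List (List Bool)) (r c : ℕ), Vle v (dfsUtil T n fuel v r c).2 := by
  intro fuel
  induction fuel with
  | zero => intro v r c z hz; simpa [dfsUtil] using hz
  | succ fuel ih =>
    intro v r c z hz
    simp only [dfsUtil]
    apply dtry_Vle _ _ _ _ _ _ ih _
    apply dtry_Vle _ _ _ _ _ _ ih _
    apply dtry_Vle _ _ _ _ _ _ ih _
    apply dtry_Vle _ _ _ _ _ _ ih _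
    exact vget_vset_le hz

lemma AU_Vle1 (T : List (List Int)) (n : ℕ) (fuel : ℕ) (v : List (List Bool)) (r c : ℕ) :
    Vle (vset v (r, c)) (dfsUtil T n (fuel + 1) v r c).2 := by
  intro z hz
  simp only [dfsUtil]
  apply dtry_Vle _ _ _ _ _ _ (AU_Vle T n fuel) _
  apply dtry_Vle _ _ _ _ _ _ (AU_Vle T n fuel) _
  apply dtry_Vle _ _ _ _ _ _ (AU_Vle T n fuel) _
  apply dtry_Vle _ _ _ _ _ _ (AU_Vle T n fuel) _
  exact hz

lemma AU_own {M : ℕ} (T : List (List Int)) (n : ℕ) (hM : n ≤ M) (fuel : ℕ)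
    (v : List (List Bool)) (r c : ℕ) (hfuel : 0 < fuel) (hv : Vshape M n v)
    (hr : r < n) (hc : c < n) : vget (dfsUtil T n fuel v r c).2 (r, c) = true := by
  cases fuel with
  | zero => omega
  | succ fuel =>
    exact AU_Vle1 T n fuel v r c (r, c) (vset_mark hv (by omega) hc)

set_option maxHeartbeats 1000000 in
lemma AU_sum {M : ℕ} (T : List (List Int)) (n : ℕ) (hM : n ≤ M) :
    ∀ (fuel : ℕ) (v : List (List Bool)) (r c : ℕ),
      Vshape M n v → r < n → c < n → vget v (r, c) = false →
      (dfsUtil T n fuel v r c).1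
        = gsum T M n (dfsUtil T n fuel v r c).2 - gsum T M n v := by
  intro fuel
  induction fuel with
  | zero =>
    intro v r c hv hr hc hun
    simp [dfsUtil]
  | succ fuel ih =>
    intro v r c hv hr hc hun
    simp only [dfsUtil]
    set v0 := vset v (r, c) with hv0
    set p1 := dtry T n (dfsUtil T n fuel) (c + 1 < n) (0, v0) (r, c + 1) with hp1
    set p2 := dtry T n (dfsUtil T n fuel) (1 ≤ c) p1 (r, c - 1) with hp2
    set p3 := dtry T n (dfsUtil T n fuel) (r + 1 < n) p2 (r + 1, c) with hp3
    set p4 := dtry T n (dfsUtil T n fuel) (1 ≤ r) p3 (r - 1, c) with hp4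
    have hs0 : Vshape M n v0 := Vshape_vset hv _
    have hs1 : Vshape M n p1.2 := by
      rw [hp1]; exact dtry_shape (fun v' hv' => AU_shape T n fuel v' _ _ hv') hs0
    have hs2 : Vshape M n p2.2 := by
      rw [hp2]; exact dtry_shape (fun v' hv' => AU_shape T n fuel v' _ _ hv') hs1
    have hs3 : Vshape M n p3.2 := by
      rw [hp3]; exact dtry_shape (fun v' hv' => AU_shape T n fuel v' _ _ hv') hs2
    have hg0 : gsum T M n v0 = gsum T M n v + tval T (r, c) :=
      gsum_vset hv (by omega) hc hun
    have h1 : p1.1 = (0 : Int) + (gsum T M n p1.2 - gsum T M n v0) := by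
      rw [hp1]
      exact dtry_sum (fun hb v' hv' hun' => ih v' r (c + 1) hv' hr hb hun') hs0
    have h2 : p2.1 = p1.1 + (gsum T M n p2.2 - gsum T M n p1.2) := by
      rw [hp2]
      exact dtry_sum (fun hb v' hv' hun' => ih v' r (c - 1) hv' hr (by omega) hun') hs1
    have h3 : p3.1 = p2.1 + (gsum T M n p3.2 - gsum T M n p2.2) := by
      rw [hp3]
      exact dtry_sum (fun hb v' hv' hun' => ih v' (r + 1) c hv' hb hc hun') hs2
    have h4 : p4.1 = p3.1 + (gsum T M n p4.2 - gsum T M n p3.2) := by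
      rw [hp4]
      exact dtry_sum (fun hb v' hv' hun' => ih v' (r - 1) c hv' (by omega) hc hun') hs3
    omega

set_option maxHeartbeats 1000000 in
lemma AU_sound (T : List (List Int)) (n : ℕ) :
    ∀ (fuel : ℕ) (v : List (List Bool)) (r c : ℕ), r < n → c < n →
      ∀ z, vget (dfsUtil T n fuel v r c).2 z = true →
        vget (vset v (r, c)) z = true ∨ Reach T n (vset v (r, c)) (r, c) z := by
  intro fuel
  induction fuel with
  | zero =>
    intro v r c hr hc z hz
    left
    exact vget_vset_le (by simpa [dfsUtil] using hz)
  | succ fuel ih =>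
    intro v r c hr hc z
    simp only [dfsUtil]
    set v0 := vset v (r, c) with hv0
    set p1 := dtry T n (dfsUtil T n fuel) (c + 1 < n) (0, v0) (r, c + 1) with hp1
    set p2 := dtry T n (dfsUtil T n fuel) (1 ≤ c) p1 (r, c - 1) with hp2
    set p3 := dtry T n (dfsUtil T n fuel) (r + 1 < n) p2 (r + 1, c) with hp3
    set p4 := dtry T n (dfsUtil T n fuel) (1 ≤ r) p3 (r - 1, c) with hp4
    have hb1 : Vle v0 p1.2 := by
      rw [hp1]
      exact dtry_Vle T n (dfsUtil T n fuel) (c + 1 < n) (0, v0) (r, c + 1) (AU_Vle T n fuel)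
    have hb2 : Vle v0 p2.2 := by
      rw [hp2]
      exact fun u hu =>
        dtry_Vle T n (dfsUtil T n fuel) (1 ≤ c) p1 (r, c - 1) (AU_Vle T n fuel) u (hb1 u hu)
    have hb3 : Vle v0 p3.2 := by
      rw [hp3]
      exact fun u hu =>
        dtry_Vle T n (dfsUtil T n fuel) (r + 1 < n) p2 (r + 1, c) (AU_Vle T n fuel) u (hb2 u hu)
    have h0 : ∀ z, vget v0 z = true → vget v0 z = true ∨ Reach T n v0 (r, c) z :=
      fun z hz => Or.inl hz
    have h1 : ∀ z, vget p1.2 z = true → vget v0 z = true ∨ Reach T n v0 (r, c) z := by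
      rw [hp1]
      exact dtry_sound (f := dfsUtil T n fuel) (bnd := c + 1 < n) (p := (0, v0))
        (y := (r, c + 1)) (v₁ := v0) (root := (r, c)) (fun u hu => hu) h0
        (fun hb => Or.inl ⟨rfl, Or.inl rfl⟩)
        (fun hb _ => ⟨hr, hb⟩)
        (fun hb v' z hz => ih v' r (c + 1) hr hb z hz)
    have h2 : ∀ z, vget p2.2 z = true → vget v0 z = true ∨ Reach T n v0 (r, c) z := by
      rw [hp2]
      exact dtry_sound (f := dfsUtil T n fuel) (bnd := 1 ≤ c) (p := p1)
        (y := (r, c - 1)) (v₁ := v0) (root := (r, c)) hb1 h1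
        (fun hb => Or.inl ⟨rfl, Or.inr (by omega)⟩)
        (fun hb _ => ⟨hr, by omega⟩)
        (fun hb v' z hz => ih v' r (c - 1) hr (by omega) z hz)
    have h3 : ∀ z, vget p3.2 z = true → vget v0 z = true ∨ Reach T n v0 (r, c) z := by
      rw [hp3]
      exact dtry_sound (f := dfsUtil T n fuel) (bnd := r + 1 < n) (p := p2)
        (y := (r + 1, c)) (v₁ := v0) (root := (r, c)) hb2 h2
        (fun hb => Or.inr ⟨rfl, Or.inl rfl⟩)
        (fun hb _ => ⟨hb, hc⟩)
        (fun hb v' z hz => ih v' (r + 1) c hb hc z hz)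
    have h4 : ∀ z, vget p4.2 z = true → vget v0 z = true ∨ Reach T n v0 (r, c) z := by
      rw [hp4]
      exact dtry_sound (f := dfsUtil T n fuel) (bnd := 1 ≤ r) (p := p3)
        (y := (r - 1, c)) (v₁ := v0) (root := (r, c)) hb3 h3
        (fun hb => Or.inr ⟨rfl, Or.inr (by omega)⟩)
        (fun hb _ => ⟨by omega, hc⟩)
        (fun hb v' z hz => ih v' (r - 1) c (by omega) hc z hz)
    exact h4 z

set_option maxHeartbeats 1000000 in
lemma AU_closed {M : ℕ} (T : List (List Int)) (n : ℕ) (hM : n ≤ M) :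
    ∀ (fuel : ℕ) (v : List (List Bool)) (r c : ℕ),
      Vshape M n v → r < n → c < n → vget v (r, c) = false → fcnt M n v < fuel →
      ∀ z, (z = (r, c) ∨ (vget (dfsUtil T n fuel v r c).2 z = true ∧
          vget (vset v (r, c)) z = false)) →
      ∀ w, adjc z w → cellOK T n w → vget (dfsUtil T n fuel v r c).2 w = true := by
  intro fuel
  induction fuel with
  | zero =>
    intro v r c hv hr hc hun hfuel
    omega
  | succ fuel ih =>
    intro v r c hv hr hc hun hfuel z hz w hadj hok
    simp only [dfsUtil] at hz ⊢
    set v0 := vset v (r, c) with hv0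
    set p1 := dtry T n (dfsUtil T n fuel) (c + 1 < n) (0, v0) (r, c + 1) with hp1
    set p2 := dtry T n (dfsUtil T n fuel) (1 ≤ c) p1 (r, c - 1) with hp2
    set p3 := dtry T n (dfsUtil T n fuel) (r + 1 < n) p2 (r + 1, c) with hp3
    set p4 := dtry T n (dfsUtil T n fuel) (1 ≤ r) p3 (r - 1, c) with hp4
    have hs0 : Vshape M n v0 := Vshape_vset hv _
    have hs1 : Vshape M n p1.2 := by
      rw [hp1]; exact dtry_shape (fun v' hv' => AU_shape T n fuel v' _ _ hv') hs0
    have hs2 : Vshape M n p2.2 := by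
      rw [hp2]; exact dtry_shape (fun v' hv' => AU_shape T n fuel v' _ _ hv') hs1
    have hs3 : Vshape M n p3.2 := by
      rw [hp3]; exact dtry_shape (fun v' hv' => AU_shape T n fuel v' _ _ hv') hs2
    have hle01 : Vle v0 p1.2 := by
      rw [hp1]
      exact dtry_Vle T n (dfsUtil T n fuel) (c + 1 < n) (0, v0) (r, c + 1) (AU_Vle T n fuel)
    have hle12 : Vle p1.2 p2.2 := by
      rw [hp2]
      exact dtry_Vle T n (dfsUtil T n fuel) (1 ≤ c) p1 (r, c - 1) (AU_Vle T n fuel)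
    have hle23 : Vle p2.2 p3.2 := by
      rw [hp3]
      exact dtry_Vle T n (dfsUtil T n fuel) (r + 1 < n) p2 (r + 1, c) (AU_Vle T n fuel)
    have hle34 : Vle p3.2 p4.2 := by
      rw [hp4]
      exact dtry_Vle T n (dfsUtil T n fuel) (1 ≤ r) p3 (r - 1, c) (AU_Vle T n fuel)
    have hle14 : Vle p1.2 p4.2 := fun u hu => hle34 u (hle23 u (hle12 u hu))
    have hle24 : Vle p2.2 p4.2 := fun u hu => hle34 u (hle23 u hu)
    have hfc0 : fcnt M n v0 < fuel := by
      have hdec := fcnt_vset hv (x := (r, c)) (by omega) hc hun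
      rw [← hv0] at hdec
      omega
    have hfc1 : fcnt M n p1.2 < fuel :=
      lt_of_le_of_lt (fcnt_anti hle01) hfc0
    have hfc2 : fcnt M n p2.2 < fuel :=
      lt_of_le_of_lt (fcnt_anti (fun u hu => hle12 u (hle01 u hu))) hfc0
    have hfc3 : fcnt M n p3.2 < fuel :=
      lt_of_le_of_lt (fcnt_anti (fun u hu => hle23 u (hle12 u (hle01 u hu)))) hfc0
    have hfuel1 : 0 < fuel := by omega
    rcases hz with rfl | ⟨hz1, hz2⟩
    · -- z is the root (r, c): every in-range positive neighbour of it ends up marked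
      rcases w with ⟨w1, w2⟩
      have hk1 : w1 < n := hok.1
      have hk2 : w2 < n := hok.2.1
      have hk3 : 0 < tval T (w1, w2) := hok.2.2
      have hcase : (w1 = r ∧ w2 = c + 1) ∨ (w1 = r ∧ w2 + 1 = c) ∨ (w2 = c ∧ w1 = r + 1) ∨
          (w2 = c ∧ w1 + 1 = r) := by
        simp only [adjc] at hadj
        omega
      rcases hcase with ⟨e1, e2⟩ | ⟨e1, e2⟩ | ⟨e1, e2⟩ | ⟨e1, e2⟩
      · have hw : ((w1, w2) : ℕ × ℕ) = (r, c + 1) := by rw [e1, e2]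
        rw [hw] at hk3 ⊢
        refine hle14 _ ?_
        rw [hp1]
        exact dtry_marks (f := dfsUtil T n fuel) (bnd := c + 1 < n) (p := (0, v0))
          (y := (r, c + 1)) hs0 (by omega) hk3
          (fun hb v' hv' => AU_own T n hM fuel v' r (c + 1) hfuel1 hv' hr hb)
      · have hw : ((w1, w2) : ℕ × ℕ) = (r, c - 1) := by
          have hw2 : w2 = c - 1 := by omega
          rw [e1, hw2]
        rw [hw] at hk3 ⊢
        refine hle24 _ ?_
        rw [hp2]
        exact dtry_marks (f := dfsUtil T n fuel) (bnd := 1 ≤ c) (p := p1)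
          (y := (r, c - 1)) hs1 (by omega) hk3
          (fun hb v' hv' => AU_own T n hM fuel v' r (c - 1) hfuel1 hv' hr (by omega))
      · have hw : ((w1, w2) : ℕ × ℕ) = (r + 1, c) := by rw [e1, e2]
        rw [hw] at hk3 ⊢
        refine hle34 _ ?_
        rw [hp3]
        exact dtry_marks (f := dfsUtil T n fuel) (bnd := r + 1 < n) (p := p2)
          (y := (r + 1, c)) hs2 (by omega) hk3
          (fun hb v' hv' => AU_own T n hM fuel v' (r + 1) c hfuel1 hv' hb hc)
      · have hw : ((w1, w2) : ℕ × ℕ) = (r - 1, c) := by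
          have hw1 : w1 = r - 1 := by omega
          rw [e1, hw1]
        rw [hw] at hk3 ⊢
        rw [hp4]
        exact dtry_marks (f := dfsUtil T n fuel) (bnd := 1 ≤ r) (p := p3)
          (y := (r - 1, c)) hs3 (by omega) hk3
          (fun hb v' hv' => AU_own T n hM fuel v' (r - 1) c hfuel1 hv' (by omega) hc)
    · -- z was newly marked by one of the four calls; find the first one
      by_cases k1 : vget p1.2 z = true
      · have hcl := dtry_closed (f := dfsUtil T n fuel) (bnd := c + 1 < n) (p := (0, v0))
          (y := (r, c + 1)) (fuel' := fuel)
          (fun hb v' hv' hun' hfc' => ih v' r (c + 1) hv' hr hb hun' hfc')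
          hs0 hfc0 z (by rw [← hp1]; exact k1) hz2 w hadj hok
        rw [← hp1] at hcl
        exact hle14 _ hcl
      · have hk1 : vget p1.2 z = false := by simpa using k1
        by_cases k2 : vget p2.2 z = true
        · have hcl := dtry_closed (f := dfsUtil T n fuel) (bnd := 1 ≤ c) (p := p1)
            (y := (r, c - 1)) (fuel' := fuel)
            (fun hb v' hv' hun' hfc' => ih v' r (c - 1) hv' hr (by omega) hun' hfc')
            hs1 hfc1 z (by rw [← hp2]; exact k2) hk1 w hadj hok
          rw [← hp2] at hcl
          exact hle24 _ hcl
        · have hk2 : vget p2.2 z = false := by simpa using k2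
          by_cases k3 : vget p3.2 z = true
          · have hcl := dtry_closed (f := dfsUtil T n fuel) (bnd := r + 1 < n) (p := p2)
              (y := (r + 1, c)) (fuel' := fuel)
              (fun hb v' hv' hun' hfc' => ih v' (r + 1) c hv' hb hc hun' hfc')
              hs2 hfc2 z (by rw [← hp3]; exact k3) hk2 w hadj hok
            rw [← hp3] at hcl
            exact hle34 _ hcl
          · have hk3 : vget p3.2 z = false := by simpa using k3
            have hcl := dtry_closed (f := dfsUtil T n fuel) (bnd := 1 ≤ r) (p := p3)
              (y := (r - 1, c)) (fuel' := fuel)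
              (fun hb v' hv' hun' hfc' => ih v' (r - 1) c hv' (by omega) hc hun' hfc')
              hs3 hfc3 z (by rw [← hp4]; exact hz1) hk3 w hadj hok
            rw [← hp4] at hcl
            exact hcl

-- ---- one start cell: A's recursive call = B's stack loop ----

set_option maxHeartbeats 1000000 in
lemma start_eq (T : List (List Int)) (M n : ℕ) (hM : n ≤ M) {v : List (List Bool)}
    (hv : Vshape M n v) (hn : 0 < n) {i : ℕ} (hi : i < n)
    (hun : vget v (0, i) = false) (hpos : 0 < tval T (0, i)) {fuelA fuelB : ℕ}
    (hfA : fcnt M n v < fuelA) (hfB : 1 + fcnt M n (vset v (0, i)) ≤ fuelB) :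
    dfsUtil T n fuelA v 0 i = stackLoop T n fuelB [(0, i)] (vset v (0, i)) 0 := by
  have hfuelA : 0 < fuelA := by omega
  have hsv1 : Vshape M n (vset v (0, i)) := Vshape_vset hv _
  have hshA : Vshape M n (dfsUtil T n fuelA v 0 i).2 := AU_shape T n fuelA v 0 i hv
  have hshB : Vshape M n (stackLoop T n fuelB [(0, i)] (vset v (0, i)) 0).2 :=
    SL_shape T n fuelB _ _ _ hsv1
  have hVle1A : Vle (vset v (0, i)) (dfsUtil T n fuelA v 0 i).2 := by
    cases fuelA with
    | zero => omega
    | succ fuelA => exact AU_Vle1 T n fuelA v 0 i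
  have hmm : ∀ z, vget (dfsUtil T n fuelA v 0 i).2 z = true ↔
      vget (stackLoop T n fuelB [(0, i)] (vset v (0, i)) 0).2 z = true := by
    intro z
    constructor
    · intro hz
      rcases AU_sound T n fuelA v 0 i hn hi z hz with h | h
      · exact SL_Vle T n fuelB _ _ _ z h
      · refine reach_subset
          (W := fun u => vget (stackLoop T n fuelB [(0, i)] (vset v (0, i)) 0).2 u = true)
          ?_ ?_ z h
        · exact SL_Vle T n fuelB _ _ _ (0, i) (vset_mark hv (by omega) hi)
        · intro x hx y hadj hok
          refine SL_closed T n hM fuelB [(0, i)] (vset v (0, i)) 0 hsv1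
            (by intro c hc; simp at hc; subst hc; exact ⟨hn, hi⟩)
            (by simpa using hfB) x ?_ y hadj hok
          rcases hx with hx | hx
          · left; simp [hx]
          · right; exact hx
    · intro hz
      rcases SL_sound T n fuelB [(0, i)] (vset v (0, i)) 0 z hz with h | ⟨s, hs, hr⟩
      · exact hVle1A z h
      · simp at hs
        subst hs
        refine reach_subset
          (W := fun u => vget (dfsUtil T n fuelA v 0 i).2 u = true) ?_ ?_ z hr
        · exact AU_own T n hM fuelA v 0 i hfuelA hv hn hi
        · intro x hx y hadj hok
          exact AU_closed T n hM fuelA v 0 i hv hn hi hun hfA x hx y hadj hok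
  have h2 : (dfsUtil T n fuelA v 0 i).2 = (stackLoop T n fuelB [(0, i)] (vset v (0, i)) 0).2 := by
    refine vext hshA hshB (fun z => ?_)
    have := hmm z
    cases ha : vget (dfsUtil T n fuelA v 0 i).2 z <;>
      cases hb : vget (stackLoop T n fuelB [(0, i)] (vset v (0, i)) 0).2 z <;>
      simp_all
  have hA1 : (dfsUtil T n fuelA v 0 i).1
      = gsum T M n (dfsUtil T n fuelA v 0 i).2 - gsum T M n v :=
    AU_sum T n hM fuelA v 0 i hv hn hi hun
  have hB1 : (stackLoop T n fuelB [(0, i)] (vset v (0, i)) 0).1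
      = 0 + stSum T [(0, i)] + (gsum T M n (stackLoop T n fuelB [(0, i)] (vset v (0, i)) 0).2
          - gsum T M n (vset v (0, i))) :=
    SL_sum T n hM fuelB _ _ _ hsv1 (by simpa using hfB)
  have hg1 : gsum T M n (vset v (0, i)) = gsum T M n v + tval T (0, i) :=
    gsum_vset hv (by omega) hi hun
  have hstS : stSum T [(0, i)] = tval T (0, i) := by simp [stSum]
  rw [Prod.ext_iff]
  refine ⟨?_, h2⟩
  rw [hA1, hB1, h2, hg1, hstS]
  ring

-- ---- the outer loop over the top row ----

lemma outer_eq (T : List (List Int)) (n M : ℕ) (hM : n ≤ M) (hn : 0 < n) :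
    ∀ (l : List ℕ) (v : List (List Bool)) (arr : List Int), (∀ i ∈ l, i < n) → Vshape M n v →
    List.foldl (fun (st : List (List Bool) × List Int) i =>
        if vget st.1 (0, i) = false ∧ 0 < tval T (0, i) then
          ((dfsUtil T n (M * n + 1) st.1 0 i).2, st.2.set i (dfsUtil T n (M * n + 1) st.1 0 i).1)
        else st) (v, arr) l
    = List.foldl (fun (st : List (List Bool) × List Int) i =>
        if vget st.1 (0, i) = false ∧ 0 < tval T (0, i) then
          ((stackLoop T n (M * n + 1) [(0, i)] (vset st.1 (0, i)) 0).2,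
            st.2.set i (stackLoop T n (M * n + 1) [(0, i)] (vset st.1 (0, i)) 0).1)
        else st) (v, arr) l := by
  intro l
  induction l with
  | nil => intro v arr _ _; rfl
  | cons i l ih =>
    intro v arr hmem hv
    simp only [List.foldl_cons]
    by_cases hg : vget v (0, i) = false ∧ 0 < tval T (0, i)
    · rw [if_pos hg, if_pos hg]
      have hi : i < n := hmem i List.mem_cons_self
      have hfA : fcnt M n v < M * n + 1 := by
        have := fcnt_le M n v
        omega
      have hfB : 1 + fcnt M n (vset v (0, i)) ≤ M * n + 1 := by
        have h0 : vget (vset v (0, i)) (0, i) = true := vset_mark hv (by omega) hi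
        have := fcnt_vset hv (x := (0, i)) (by omega) hi hg.1
        have := fcnt_le M n v
        omega
      have hstart := start_eq T M n hM hv hn hi hg.1 hg.2 hfA hfB
      rw [hstart]
      exact ih _ _ (fun j hj => hmem j (List.mem_cons_of_mem _ hj))
        (SL_shape T n _ _ _ _ (Vshape_vset hv _))
    · rw [if_neg hg, if_neg hg]
      exact ih _ _ (fun j hj => hmem j (List.mem_cons_of_mem _ hj)) hv

-- ===== VERDICT (by name: the statement is the Claim_ definition above) =====
theorem DFS_spec : Claim_equal_DFS := by
  intro T n m hdom hpre
  unfold Spec_DFS DFS DFS_alt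
  by_cases hn : n.toNat = 0
  · rw [hn]
    rfl
  · have hn' : 0 < n.toNat := Nat.pos_of_ne_zero hn
    have h0n : 0 < n := by omega
    obtain ⟨hnm, -, -⟩ := hpre h0n
    have hNM : n.toNat ≤ m.toNat := by omega
    have hshape0 : Vshape m.toNat n.toNat (List.replicate m.toNat (List.replicate n.toNat false)) := by
      constructor
      · simp
      · intro r hr
        rw [List.eq_of_mem_replicate hr]
        simp
    have := outer_eq T n.toNat m.toNat hNM hn' (List.range n.toNat)
      (List.replicate m.toNat (List.replicate n.toNat false)) (List.replicate n.toNat 0)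
      (fun i hi => List.mem_range.mp hi) hshape0
    rw [this]
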